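-- pv_equiv track=rewrite | github.com/christianebacani/Roadmap | Coding Challenges using Python and SQL/Code Wars Python Solved Problems/7 Kyu/are_the_twins_even.py | even_twins
-- ===== SOURCE A (Python) =====
-- def even_twins(numbers: list[int]) -> int:
--     sums = []
--
--     for i in range(len(numbers)):
--         for j in range(len(numbers)):
--             if i < j:
--                 sums.append(numbers[i] + numbers[j])
--
--     sums = list(set(sums))
--     count = 0
--
--     for i in range(len(sums)):
--         if sums[i] % 2 == 0:
--             count += 1
--
--     return count
-- ===== SOURCE B (Python) =====
-- def even_twins(numbers: list[int]) -> int: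
--     # A sum of two numbers is even exactly when they have the same parity,
--     # so collect the pairwise sums within the evens and within the odds.
--     evens = [x for x in numbers if x % 2 == 0]
--     odds = [x for x in numbers if x % 2 != 0]
--
--     def pair_sums(group, acc):
--         while group:
--             a, group = group[0], group[1:]
--             for b in group:
--                 acc.add(a + b)
--         return acc
--
--     return len(pair_sums(odds, pair_sums(evens, set())))
-- ===== Notes on version B (the rewrite author's own statement) =====
-- stated objective: alternative
-- what changed: Instead of generating all O(n^2) index pairs and post-filtering the deduplicated sums for evenness, B partitions the input by parity and collects only same-parity pairwise sums directly into a set, whose size is the answer.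
import Mathlib
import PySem

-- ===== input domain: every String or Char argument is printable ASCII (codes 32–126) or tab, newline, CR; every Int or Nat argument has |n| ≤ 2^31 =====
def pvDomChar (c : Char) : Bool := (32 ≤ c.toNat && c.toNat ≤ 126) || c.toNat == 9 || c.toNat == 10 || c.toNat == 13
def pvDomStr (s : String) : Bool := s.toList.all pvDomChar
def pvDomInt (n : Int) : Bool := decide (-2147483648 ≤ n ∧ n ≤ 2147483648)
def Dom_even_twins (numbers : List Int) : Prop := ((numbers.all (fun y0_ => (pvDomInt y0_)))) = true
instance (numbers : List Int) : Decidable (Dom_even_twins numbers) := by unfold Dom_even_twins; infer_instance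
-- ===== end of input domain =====

-- B partitions by parity and collects same-parity pairwise sums into a set; A builds all pairwise sums, dedups, and counts the even ones.

-- ===== PORT A =====
def even_twins (numbers : List Int) : Int :=
  let n : Int := PySem.List.len numbers
  let sums : List Int :=
    (PySem.List.pyRange 0 n 1).foldl (fun acc i =>
      (PySem.List.pyRange 0 n 1).foldl (fun acc j =>
        if i < j then acc ++ [PySem.List.pyGetD numbers i 0 + PySem.List.pyGetD numbers j 0]
        else acc) acc) []
  -- list(set(sums)): iteration order of the Python set is not modelled, but the
  -- count below is order-independent, so the dedup list in first-occurrence order is exact.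
  let sums := PySem.Set.ofList sums
  let count : Int :=
    (PySem.List.pyRange 0 (PySem.List.len sums) 1).foldl (fun c i =>
      if PySem.Int.mod (PySem.List.pyGetD sums i 0) 2 = 0 then c + 1 else c) 0
  count

-- ===== PORT B =====
def pvPairSums (group : List Int) (acc : PySem.Set Int) : PySem.Set Int :=
  match group with
  | [] => acc
  | a :: rest => pvPairSums rest (rest.foldl (fun s b => PySem.Set.add s (a + b)) acc)

def even_twins_alt (numbers : List Int) : Int :=
  let evens := numbers.filter (fun x => PySem.Int.mod x 2 = 0)
  let odds := numbers.filter (fun x => ¬ PySem.Int.mod x 2 = 0)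
  PySem.Set.len (pvPairSums odds (pvPairSums evens PySem.Set.empty))

-- ===== PRECONDITION & SPEC =====
def Spec_even_twins (numbers : List Int) (out : Int) : Prop := out = even_twins_alt numbers
instance (numbers : List Int) (out : Int) : Decidable (Spec_even_twins numbers out) := by unfold Spec_even_twins; infer_instance

-- ===== CLAIM (what is proved, stated in full; the proofs are below) =====
def Claim_equal_even_twins : Prop := ∀ (numbers : List Int), Dom_even_twins numbers → Spec_even_twins numbers (even_twins numbers)

-- ===== LEMMAS AND PROOFS =====

theorem pvModTwo (x : Int) : PySem.Int.mod x 2 = x % 2 :=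
  PySem.Int.mod_eq_emod_of_pos (by norm_num)

-- "x is the sum of two elements of l taken at two distinct positions (earlier + later)"
def HasPair (x : Int) : List Int → Prop
  | [] => False
  | a :: r => (∃ b ∈ r, x = a + b) ∨ HasPair x r

-- index characterisation of HasPair
theorem pvIdx_iff (l : List Int) (x : Int) :
    (∃ i j : Nat, i < j ∧ j < l.length ∧ x = l.getD i 0 + l.getD j 0) ↔ HasPair x l := by
  induction l with
  | nil => simp [HasPair]
  | cons a r ih =>
    constructor
    · rintro ⟨i, j, hij, hj, rfl⟩
      cases i with
      | zero =>
        cases j with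
        | zero => omega
        | succ j' =>
          left
          have hj' : j' < r.length := by simpa using hj
          refine ⟨r.getD j' 0, ?_, by simp⟩
          rw [List.getD_eq_getElem r 0 hj']
          exact List.getElem_mem hj'

      | succ i' =>
        cases j with
        | zero => omega
        | succ j' =>
          right
          exact ih.mp ⟨i', j', by omega, by simpa using hj, by simp⟩
    · rintro (⟨b, hb, rfl⟩ | h)
      · rcases List.mem_iff_getElem.mp hb with ⟨j', hj', rfl⟩
        exact ⟨0, j' + 1, by omega, by simpa using hj', by simp [List.getD, List.getElem?_eq_getElem hj']⟩
      · rcases ih.mpr h with ⟨i, j, hij, hj, rfl⟩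
        exact ⟨i + 1, j + 1, by omega, by simpa using hj, by simp⟩

-- A's sums list contains exactly the pairwise sums
theorem pvMemSumsA (l : List Int) (x : Int) :
    x ∈ (PySem.List.pyRange 0 (PySem.List.len l) 1).foldl (fun acc i =>
      (PySem.List.pyRange 0 (PySem.List.len l) 1).foldl (fun acc j =>
        if i < j then acc ++ [PySem.List.pyGetD l i 0 + PySem.List.pyGetD l j 0]
        else acc) acc) ([] : List Int) ↔ HasPair x l := by
  have hinner : ∀ (i : Int) (acc : List Int),
      (PySem.List.pyRange 0 (PySem.List.len l) 1).foldl (fun acc j =>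
        if i < j then acc ++ [PySem.List.pyGetD l i 0 + PySem.List.pyGetD l j 0]
        else acc) acc =
      acc ++ ((PySem.List.pyRange 0 (PySem.List.len l) 1).filter (fun j => decide (i < j))).map
        (fun j => PySem.List.pyGetD l i 0 + PySem.List.pyGetD l j 0) := by
    intro i acc
    have := PySem.List.foldl_append_if (fun j => decide (i < j))
      (fun j => PySem.List.pyGetD l i 0 + PySem.List.pyGetD l j 0)
      (PySem.List.pyRange 0 (PySem.List.len l) 1) acc
    simpa using this
  rw [show (fun (acc : List Int) (i : Int) =>
      (PySem.List.pyRange 0 (PySem.List.len l) 1).foldl (fun acc j =>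
        if i < j then acc ++ [PySem.List.pyGetD l i 0 + PySem.List.pyGetD l j 0]
        else acc) acc) = (fun acc i => acc ++
        ((PySem.List.pyRange 0 (PySem.List.len l) 1).filter (fun j => decide (i < j))).map
          (fun j => PySem.List.pyGetD l i 0 + PySem.List.pyGetD l j 0)) from
    funext fun acc => funext fun i => hinner i acc]
  rw [PySem.List.foldl_append_eq_flatMap]
  rw [← pvIdx_iff]
  simp only [List.nil_append, List.mem_flatMap, List.mem_map, List.mem_filter,
    PySem.List.mem_pyRange_one, decide_eq_true_eq, PySem.List.len]
  constructor
  · rintro ⟨i, ⟨hi0, hin⟩, j, ⟨⟨hj0, hjn⟩, hij⟩, rfl⟩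
    refine ⟨i.toNat, j.toNat, by omega, by omega, ?_⟩
    rw [PySem.List.pyGetD_of_nonneg l 0 hi0, PySem.List.pyGetD_of_nonneg l 0 hj0]
  · rintro ⟨i, j, hij, hj, rfl⟩
    refine ⟨(i : Int), ⟨by omega, by omega⟩, (j : Int), ⟨⟨by omega, by omega⟩, by omega⟩, ?_⟩
    rw [PySem.List.pyGetD_of_nonneg l 0 (by omega), PySem.List.pyGetD_of_nonneg l 0 (by omega)]
    simp

-- B-side membership
theorem pvMemFoldlAdd (a x : Int) (l : List Int) (acc : PySem.Set Int) :
    x ∈ l.foldl (fun s b => PySem.Set.add s (a + b)) acc ↔ x ∈ acc ∨ ∃ b ∈ l, x = a + b := by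
  induction l generalizing acc with
  | nil => simp
  | cons c r ih =>
    simp only [List.foldl_cons, ih, PySem.Set.mem_add, List.mem_cons]
    constructor
    · rintro (( h | rfl) | ⟨b, hb, rfl⟩)
      · exact Or.inl h
      · exact Or.inr ⟨c, Or.inl rfl, rfl⟩
      · exact Or.inr ⟨b, Or.inr hb, rfl⟩
    · rintro (h | ⟨b, (rfl | hb), rfl⟩)
      · exact Or.inl (Or.inl h)
      · exact Or.inl (Or.inr rfl)
      · exact Or.inr ⟨b, hb, rfl⟩

theorem pvMemPairSums (g : List Int) (acc : PySem.Set Int) (x : Int) :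
    x ∈ pvPairSums g acc ↔ x ∈ acc ∨ HasPair x g := by
  induction g generalizing acc with
  | nil => simp [pvPairSums, HasPair]
  | cons a r ih =>
    simp only [pvPairSums, ih, pvMemFoldlAdd, HasPair]
    exact or_assoc

theorem pvNodupPairSums (g : List Int) (acc : PySem.Set Int) (h : acc.Nodup) :
    (pvPairSums g acc).Nodup := by
  induction g generalizing acc with
  | nil => exact h
  | cons a r ih =>
    refine ih _ ?_
    clear ih
    induction r generalizing acc with
    | nil => exact h
    | cons c r' ih' => exact ih' _ (PySem.Set.nodup_add _ _ h)

-- HasPair is monotone under sublists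
theorem pvHasPair_sublist {x : Int} {l₁ l₂ : List Int} (h : l₁.Sublist l₂) :
    HasPair x l₁ → HasPair x l₂ := by
  induction h with
  | slnil => exact id
  | cons a _ ih => exact fun hp => Or.inr (ih hp)
  | cons₂ a h ih =>
    rintro (⟨b, hb, rfl⟩ | hp)
    · exact Or.inl ⟨b, h.subset hb, rfl⟩
    · exact Or.inr (ih hp)

theorem pvHasPair_exists {x : Int} {l : List Int} (h : HasPair x l) :
    ∃ a ∈ l, ∃ b ∈ l, x = a + b := by
  induction l with
  | nil => exact h.elim
  | cons a r ih =>
    rcases h with ⟨b, hb, rfl⟩ | h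
    · exact ⟨a, by simp, b, by simp [hb], rfl⟩
    · rcases ih h with ⟨a', ha', b', hb', rfl⟩
      exact ⟨a', by simp [ha'], b', by simp [hb'], rfl⟩

-- even pairwise sums split by parity
theorem pvParitySplit {x : Int} {l : List Int} (hx : x % 2 = 0) (h : HasPair x l) :
    HasPair x (l.filter (fun y => decide (y % 2 = 0))) ∨
    HasPair x (l.filter (fun y => !decide (y % 2 = 0))) := by
  induction l with
  | nil => exact h.elim
  | cons a r ih =>
    rcases h with ⟨b, hb, rfl⟩ | h
    · by_cases ha : a % 2 = 0
      · left
        have hbe : b % 2 = 0 := by omega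
        rw [List.filter_cons_of_pos (by simpa using ha)]
        exact Or.inl ⟨b, List.mem_filter.mpr ⟨hb, by simpa using hbe⟩, rfl⟩
      · right
        have hbo : ¬ b % 2 = 0 := by omega
        rw [List.filter_cons_of_pos (by simpa using ha)]
        exact Or.inl ⟨b, List.mem_filter.mpr ⟨hb, by simpa using hbo⟩, rfl⟩
    · rcases ih h with h' | h'
      · left
        by_cases ha : a % 2 = 0
        · rw [List.filter_cons_of_pos (by simpa using ha)]; exact Or.inr h'
        · rwa [List.filter_cons_of_neg (by simpa using ha)]
      · right
        by_cases ha : a % 2 = 0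
        · rwa [List.filter_cons_of_neg (by simpa using ha)]
        · rw [List.filter_cons_of_pos (by simpa using ha)]; exact Or.inr h'

theorem pvEvenOfFilterEven {x : Int} {l : List Int}
    (h : HasPair x (l.filter (fun y => decide (y % 2 = 0)))) : x % 2 = 0 := by
  rcases pvHasPair_exists h with ⟨a, ha, b, hb, rfl⟩
  have ha' := (List.mem_filter.mp ha).2
  have hb' := (List.mem_filter.mp hb).2
  simp only [decide_eq_true_eq] at ha' hb'
  omega

theorem pvEvenOfFilterOdd {x : Int} {l : List Int}
    (h : HasPair x (l.filter (fun y => !decide (y % 2 = 0)))) : x % 2 = 0 := by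
  rcases pvHasPair_exists h with ⟨a, ha, b, hb, rfl⟩
  have ha' := (List.mem_filter.mp ha).2
  have hb' := (List.mem_filter.mp hb).2
  simp only [Bool.not_eq_true', decide_eq_false_iff_not] at ha' hb'
  omega

-- ===== VERDICT (by name: the statement is the Claim_ definition above) =====
theorem even_twins_spec : Claim_equal_even_twins := by
  intro numbers _
  show even_twins numbers = even_twins_alt numbers
  unfold even_twins even_twins_alt
  simp only [pvModTwo]
  -- A's counting loop is countP over the dedup list
  set S : List Int :=
    (PySem.List.pyRange 0 (PySem.List.len numbers) 1).foldl (fun acc i =>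
      (PySem.List.pyRange 0 (PySem.List.len numbers) 1).foldl (fun acc j =>
        if i < j then acc ++ [PySem.List.pyGetD numbers i 0 + PySem.List.pyGetD numbers j 0]
        else acc) acc) [] with hS
  have hcount :
      (PySem.List.pyRange 0 (PySem.List.len (PySem.Set.ofList S)) 1).foldl (fun c i =>
        if (PySem.List.pyGetD (PySem.Set.ofList S) i 0) % 2 = 0 then c + 1 else c) 0 =
      (((PySem.Set.ofList S).filter (fun y => decide (y % 2 = 0))).length : Int) := by
    rw [PySem.List.foldl_pyRange_zero_pyGetD (PySem.Set.ofList S) 0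
      (fun c v => if v % 2 = 0 then c + 1 else c) 0]
    have := PySem.List.foldl_count_if (fun y => decide (y % 2 = 0)) (PySem.Set.ofList S) 0
    simp only [decide_eq_true_eq] at this
    rw [this, List.countP_eq_length_filter]
    simp
  rw [hcount]
  -- B's set
  have hperm :
      ((PySem.Set.ofList S).filter (fun y => decide (y % 2 = 0))).Perm
      (pvPairSums (numbers.filter (fun y => !decide (y % 2 = 0)))
        (pvPairSums (numbers.filter (fun y => decide (y % 2 = 0))) PySem.Set.empty)) := by
    rw [List.perm_ext_iff_of_nodup
      ((PySem.Set.nodup_ofList S).filter _)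
      (pvNodupPairSums _ _ (pvNodupPairSums _ _ (by simp [PySem.Set.empty])))]
    intro x
    have hmem : x ∈ S ↔ HasPair x numbers := by rw [hS]; exact pvMemSumsA numbers x
    rw [List.mem_filter, PySem.Set.mem_ofList, hmem,
      pvMemPairSums, pvMemPairSums]
    simp only [PySem.Set.empty, List.not_mem_nil, false_or, decide_eq_true_eq]
    constructor
    · rintro ⟨hp, hx⟩
      exact (pvParitySplit hx hp).imp id id
    · rintro (h | h)
      · exact ⟨pvHasPair_sublist List.filter_sublist h, pvEvenOfFilterEven h⟩
      · exact ⟨pvHasPair_sublist List.filter_sublist h, pvEvenOfFilterOdd h⟩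
  simp only [PySem.Set.len, hperm.length_eq, decide_not]
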